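-- pv_equiv track=rewrite | github.com/soyukke/lean-unsolved | scripts/erdos20_sunflower.py | contains_k_sunflower
-- ===== SOURCE A (Python) =====
-- import itertools
--
-- def is_sunflower(sets):
--     """集合のリストがひまわりかどうか判定する。
--     k個の集合で、任意の2つの共通部分が全て同じ（core）であれば真。
--     """
--     if len(sets) < 2:
--         return True
--     # 全ペアの共通部分が同じか確認
--     core = sets[0] & sets[1]
--     for i in range(len(sets)):
--         for j in range(i + 1, len(sets)):
--             if sets[i] & sets[j] != core:
--                 return False
--     # 花びら部分が互いに素か確認（coreを除いた部分が互いに素）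
--     petals = [s - core for s in sets]
--     for i in range(len(petals)):
--         for j in range(i + 1, len(petals)):
--             if petals[i] & petals[j]:
--                 return False
--     return True
--
-- def contains_k_sunflower(family, k):
--     """集合族がk-ひまわりを含むか判定する。"""
--     family_list = list(family)
--     if len(family_list) < k:
--         return False, []
--     for combo in itertools.combinations(family_list, k):
--         sets = [frozenset(s) for s in combo]
--         if is_sunflower(sets):
--             return True, sets
--     return False, []
-- ===== SOURCE B (Python) =====
-- import itertools
--
-- def contains_k_sunflower(family, k):
--     """集合族がk-ひまわりを含むか判定する。"""
--     family_list = list(family)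
--     if len(family_list) < k:
--         return False, []
--     for combo in itertools.combinations(family_list, k):
--         sets = [frozenset(s) for s in combo]
--         # frequency table: a combo is a sunflower iff every element occurs
--         # in exactly one of the k sets (petal) or in all of them (core)
--         counts = {}
--         for s in sets:
--             for x in s:
--                 counts[x] = counts.get(x, 0) + 1
--         if all(v == 1 or v == len(sets) for v in counts.values()):
--             return True, sets
--     return False, []
-- ===== Notes on version B (the rewrite author's own statement) =====
-- stated objective: alternative
-- what changed: The inner sunflower test is replaced: instead of A's two nested pairwise loops (all pairwise intersections equal the core of the first two sets, then pairwise-disjoint petals), B builds one frequency table of all elements across the k sets and accepts iff every element occurs exactly once or in all k sets; Pre_ only excludes k < 0, where itertools.combinations raises ValueError in both programs.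
import Mathlib
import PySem

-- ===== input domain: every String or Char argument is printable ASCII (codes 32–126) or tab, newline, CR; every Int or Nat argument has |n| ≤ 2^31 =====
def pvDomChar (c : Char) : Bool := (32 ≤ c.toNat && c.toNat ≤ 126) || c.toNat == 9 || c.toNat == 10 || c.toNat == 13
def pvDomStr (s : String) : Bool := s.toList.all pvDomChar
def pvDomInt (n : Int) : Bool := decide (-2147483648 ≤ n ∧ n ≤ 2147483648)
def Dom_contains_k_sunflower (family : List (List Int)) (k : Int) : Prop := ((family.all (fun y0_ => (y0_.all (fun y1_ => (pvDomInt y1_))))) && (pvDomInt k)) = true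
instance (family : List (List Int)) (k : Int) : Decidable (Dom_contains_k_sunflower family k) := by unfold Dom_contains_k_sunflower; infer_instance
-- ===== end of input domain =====

-- B replaces the pairwise-intersection sunflower test by a one-pass element-frequency test
-- (every element occurs once or in all k sets); the brute-force enumeration of combinations stays.


-- ===== PORT A =====
-- the Python double index loop 'for i: for j in range(i+1,len): if not P(xs[i],xs[j]): return False'
-- rendered structurally: same pairs, same order, same early exit
def pvAllPairs (p : List Int → List Int → Bool) : List (List Int) → Bool
  | [] => true
  | x :: xs => xs.all (p x) && pvAllPairs p xs

def pvIsSunflower (sets : List (List Int)) : Bool :=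
  if sets.length < 2 then true
  else
    let core := PySem.Set.inter (PySem.List.pyGetD sets 0 []) (PySem.List.pyGetD sets 1 [])
    if !pvAllPairs (fun a b => PySem.Set.equal (PySem.Set.inter a b) core) sets then false
    else
      let petals := sets.map (fun s => PySem.Set.diff s core)
      pvAllPairs (fun a b => PySem.Set.inter a b == ([] : List Int)) petals

def contains_k_sunflower (family : List (List Int)) (k : Int) : Bool × List (List Int) :=
  let family_list := family
  if (family_list.length : Int) < k then (false, [])
  else
    match (PySem.List.combinations family_list k.toNat).find?
        (fun combo => pvIsSunflower (combo.map (fun s => PySem.Set.ofList s))) with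
    | some combo => (true, combo.map (fun s => PySem.Set.ofList s))
    | none => (false, [])

-- ===== PORT B =====
def pvFreqOK (sets : List (List Int)) : Bool :=
  let counts := sets.foldl (fun d s => s.foldl (fun d x => d.insert x (d.getD x 0 + 1)) d) PySem.Dict.empty
  counts.values.all (fun v => v == 1 || v == (sets.length : Int))

def contains_k_sunflower_alt (family : List (List Int)) (k : Int) : Bool × List (List Int) :=
  if (family.length : Int) < k then (false, [])
  else
    match (PySem.List.combinations family k.toNat).findSome?
        (fun combo =>
          let sets := combo.map (fun s => PySem.Set.ofList s)
          if pvFreqOK sets then some sets else none) with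
    | some sets => (true, sets)
    | none => (false, [])

-- ===== PRECONDITION & SPEC =====
-- Pre_ excludes exactly k < 0, where A raises ValueError (itertools.combinations with negative r).
def Pre_contains_k_sunflower (_family : List (List Int)) (k : Int) : Prop := 0 ≤ k
instance (family : List (List Int)) (k : Int) : Decidable (Pre_contains_k_sunflower family k) := by unfold Pre_contains_k_sunflower; infer_instance
def pvWitness_contains_k_sunflower : List (List Int) × Int := ([[1, 2], [1, 3]], 2)

def Spec_contains_k_sunflower (family : List (List Int)) (k : Int) (out : Bool × List (List Int)) : Prop := out = contains_k_sunflower_alt family k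
instance (family : List (List Int)) (k : Int) (out : Bool × List (List Int)) : Decidable (Spec_contains_k_sunflower family k out) := by unfold Spec_contains_k_sunflower; infer_instance

-- ===== CLAIM (what is proved, stated in full; the proofs are below) =====
def Claim_equal_contains_k_sunflower : Prop := ∀ (family : List (List Int)) (k : Int), Dom_contains_k_sunflower family k → Pre_contains_k_sunflower family k → Spec_contains_k_sunflower family k (contains_k_sunflower family k)

-- ===== LEMMAS AND PROOFS =====

theorem pvAllPairs_iff (p : List Int → List Int → Bool) (l : List (List Int)) :
    pvAllPairs p l = true ↔ l.Pairwise (fun a b => p a b = true) := by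
  induction l with
  | nil => simp [pvAllPairs]
  | cons x xs ih => simp [pvAllPairs, ih, List.pairwise_cons, List.all_eq_true]

-- two positions with p give countP ≥ 2
theorem pv_two_le_countP (p : List Int → Bool) (l : List (List Int)) (i j : Nat)
    (hi : i < l.length) (hj : j < l.length) (hij : i < j)
    (hpi : p l[i] = true) (hpj : p l[j] = true) : 2 ≤ l.countP p := by
  induction l generalizing i j with
  | nil => simp at hj
  | cons x xs ih =>
    cases i with
    | zero =>
      simp only [List.getElem_cons_zero] at hpi
      cases j with
      | zero => omega
      | succ j' =>
        have hj' : j' < xs.length := by simpa using hj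
        have hpj' : p xs[j'] = true := by simpa using hpj
        have hpos : 0 < xs.countP p := List.countP_pos_iff.mpr ⟨_, List.getElem_mem hj', hpj'⟩
        rw [List.countP_cons]
        simp only [hpi, if_pos]
        omega
    | succ i' =>
      cases j with
      | zero => omega
      | succ j' =>
        have := ih i' j' (by simpa using hi) (by simpa using hj) (by omega)
          (by simpa using hpi) (by simpa using hpj)
        rw [List.countP_cons]
        omega

-- countP ≥ 2 gives two positions
theorem pv_exists_two_of_countP (p : List Int → Bool) (l : List (List Int))
    (h : 2 ≤ l.countP p) :
    ∃ i j, ∃ (hi : i < l.length) (hj : j < l.length), i < j ∧ p l[i] = true ∧ p l[j] = true := by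
  induction l with
  | nil => simp at h
  | cons x xs ih =>
    by_cases hx : p x = true
    · have hpos : 0 < xs.countP p := by rw [List.countP_cons_of_pos hx] at h; omega
      obtain ⟨y, hy, hpy⟩ := List.countP_pos_iff.mp hpos
      obtain ⟨j, hj, rfl⟩ := List.getElem_of_mem hy
      exact ⟨0, j + 1, by simp, by simpa using hj, by omega, by simpa using hx, by simpa using hpy⟩
    · have : 2 ≤ xs.countP p := by
        rw [List.countP_cons_of_neg (by simpa using hx)] at h; exact h
      obtain ⟨i, j, hi, hj, hij, hpi, hpj⟩ := ih this
      exact ⟨i + 1, j + 1, by simpa using hi, by simpa using hj, by omega,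
        by simpa using hpi, by simpa using hpj⟩

-- flatten.count = countP membership, for lists of Nodup lists
theorem pv_count_flatten (sets : List (List Int)) (x : Int)
    (hnd : ∀ s ∈ sets, s.Nodup) :
    sets.flatten.count x = sets.countP (fun s => decide (x ∈ s)) := by
  induction sets with
  | nil => simp
  | cons s rest ih =>
    have ih' := ih (fun t ht => hnd t (by simp [ht]))
    by_cases h : x ∈ s
    · rw [List.flatten_cons, List.count_append, List.count_eq_one_of_mem (hnd s (by simp)) h,
        List.countP_cons_of_pos (by simpa using h), ih']
      omega
    · rw [List.flatten_cons, List.count_append, List.count_eq_zero_of_not_mem h,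
        List.countP_cons_of_neg (by simpa using h), ih']
      omega

-- characterization of B's frequency test
theorem pvFreqOK_iff (sets : List (List Int)) :
    pvFreqOK sets = true ↔
      ∀ x ∈ sets.flatten, (sets.flatten.count x : Int) = 1 ∨ (sets.flatten.count x : Int) = sets.length := by
  have hkeys : (sets.flatten.foldl (fun d x => d.insert x (d.getD x 0 + 1))
      (PySem.Dict.empty : PySem.Dict Int Int)).keys = PySem.Set.ofList sets.flatten := by
    rw [PySem.Dict.keys_foldl_insert]
    simp [PySem.Dict.keys_empty, PySem.Set.update_nil_left]
  have hnd : (sets.flatten.foldl (fun d x => d.insert x (d.getD x 0 + 1))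
      (PySem.Dict.empty : PySem.Dict Int Int)).keys.Nodup := by
    rw [hkeys]; exact PySem.Set.nodup_ofList _
  rw [show pvFreqOK sets = ((sets.flatten.foldl (fun d x => d.insert x (d.getD x 0 + 1))
        (PySem.Dict.empty : PySem.Dict Int Int)).values.all
        (fun v => v == 1 || v == (sets.length : Int))) from by
    simp only [pvFreqOK]; rw [← List.foldl_flatten]]
  rw [PySem.Dict.values_eq_map_keys _ hnd 0, hkeys]
  simp only [List.all_map, List.all_eq_true, Function.comp,
    PySem.Dict.getD_foldl_insert_add_one, PySem.Dict.getD_empty, zero_add,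
    Bool.or_eq_true, beq_iff_eq, PySem.Set.mem_ofList]

-- the main mathematical equivalence, on lists of Nodup lists (as produced by Set.ofList)
theorem pv_sunflower_eq_freq (sets : List (List Int)) (hnd : ∀ s ∈ sets, s.Nodup) :
    pvIsSunflower sets = pvFreqOK sets := by
  rcases sets with _ | ⟨s0, _ | ⟨s1, rest⟩⟩
  · rfl
  · -- one set: both tests accept
    have h1 : pvFreqOK [s0] = true := by
      rw [pvFreqOK_iff]
      intro x hx
      simp only [List.flatten_cons, List.flatten_nil, List.append_nil] at hx ⊢
      left
      have hc : List.count x s0 = 1 := List.count_eq_one_of_mem (hnd s0 (by simp)) hx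
      simp [hc]
    simp [pvIsSunflower, h1]
  · -- n ≥ 2
    set sets := s0 :: s1 :: rest with hsets
    have hlen : ¬ sets.length < 2 := by simp [hsets]
    have hget0 : PySem.List.pyGetD sets 0 [] = s0 := by rw [hsets]; simp [pysem]
    have hget1 : PySem.List.pyGetD sets 1 [] = s1 := by rw [hsets]; simp [pysem]
    set core := PySem.Set.inter s0 s1 with hcore
    have hcoremem : ∀ x, x ∈ core ↔ x ∈ s0 ∧ x ∈ s1 := by
      intro x; rw [hcore]; exact PySem.Set.mem_inter s0 s1 x
    have hcnt : ∀ x, sets.flatten.count x = sets.countP (fun s => decide (x ∈ s)) :=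
      fun x => pv_count_flatten sets x hnd
    rw [show pvIsSunflower sets =
        (pvAllPairs (fun a b => PySem.Set.equal (PySem.Set.inter a b) core) sets &&
         pvAllPairs (fun a b => PySem.Set.inter a b == ([] : List Int))
           (sets.map (fun s => PySem.Set.diff s core))) from by
      unfold pvIsSunflower
      rw [if_neg hlen]
      simp only [hget0, hget1, ← hcore]
      cases h : pvAllPairs (fun a b => PySem.Set.equal (PySem.Set.inter a b) core) sets <;> simp [h]]
    by_cases hB : pvFreqOK sets = true
    · -- counts all 1 or n ⇒ both pair tests pass
      rw [hB]
      rw [pvFreqOK_iff] at hB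
      have hall : ∀ x, (sets.flatten.count x : Int) = sets.length → ∀ s ∈ sets, x ∈ s := by
        intro x hx s hs
        rw [hcnt x] at hx
        have hx' : sets.countP (fun s => decide (x ∈ s)) = sets.length := by exact_mod_cast hx
        have := (List.countP_eq_length).mp hx' s hs
        simpa using this
      have htwo : ∀ x i j (hi : i < sets.length) (hj : j < sets.length), i < j →
          x ∈ sets[i] → x ∈ sets[j] → (sets.flatten.count x : Int) = sets.length := by
        intro x i j hi hj hij hxi hxj
        have h2 : 2 ≤ sets.countP (fun s => decide (x ∈ s)) :=
          pv_two_le_countP _ sets i j hi hj hij (by simpa using hxi) (by simpa using hxj)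
        have hxf : x ∈ sets.flatten := List.mem_flatten.mpr ⟨_, List.getElem_mem hj, hxj⟩
        rcases hB x hxf with h1 | hn
        · exfalso; rw [hcnt x] at h1; omega
        · exact hn
      rw [Bool.and_eq_true]
      constructor
      · -- pairwise intersections equal core
        rw [pvAllPairs_iff, List.pairwise_iff_getElem]
        intro i j hi hj hij
        rw [PySem.Set.equal_iff]
        intro x
        rw [PySem.Set.mem_inter, hcoremem]
        constructor
        · intro ⟨hxi, hxj⟩
          have hn := htwo x i j hi hj hij hxi hxj
          exact ⟨hall x hn s0 (by simp [hsets]), hall x hn s1 (by simp [hsets])⟩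
        · intro ⟨h0, h1⟩
          have hn := htwo x 0 1 (by simp [hsets]) (by simp [hsets]) (by omega)
            (by simpa [hsets] using h0) (by simpa [hsets] using h1)
          exact ⟨hall x hn _ (List.getElem_mem hi), hall x hn _ (List.getElem_mem hj)⟩
      · -- petals pairwise disjoint
        rw [pvAllPairs_iff, List.pairwise_iff_getElem]
        intro i j hi hj hij
        simp only [List.length_map] at hi hj
        rw [List.getElem_map, List.getElem_map, beq_iff_eq, List.eq_nil_iff_forall_not_mem]
        intro x hx
        rw [PySem.Set.mem_inter, PySem.Set.mem_diff, PySem.Set.mem_diff] at hx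
        obtain ⟨⟨hxi, hxc⟩, hxj, _⟩ := hx
        have hn := htwo x i j hi hj hij hxi hxj
        exact hxc ((hcoremem x).mpr ⟨hall x hn s0 (by simp [hsets]), hall x hn s1 (by simp [hsets])⟩)
    · -- counts bad ⇒ A's test fails too
      rw [Bool.not_eq_true] at hB
      rw [hB]
      rw [Bool.and_eq_false_iff]
      by_cases hA : pvAllPairs (fun a b => PySem.Set.equal (PySem.Set.inter a b) core) sets = true
      swap
      · left; simpa using hA
      · -- all pairwise intersections equal core ⇒ every count is 1 or n, contradicting hB
        exfalso
        apply absurd _ (by simp [hB] : ¬ pvFreqOK sets = true)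
        rw [pvFreqOK_iff]
        rw [pvAllPairs_iff, List.pairwise_iff_getElem] at hA
        have hpairs : ∀ i j (hi : i < sets.length) (hj : j < sets.length), i < j → ∀ x,
            (x ∈ sets[i] ∧ x ∈ sets[j]) ↔ x ∈ core := by
          intro i j hi hj hij x
          have := hA i j hi hj hij
          rw [PySem.Set.equal_iff] at this
          have := this x
          rwa [PySem.Set.mem_inter] at this
        have hcoreAll : ∀ x, x ∈ core → ∀ i (hi : i < sets.length), x ∈ sets[i] := by
          intro x hx i hi
          rcases Nat.lt_or_ge i 2 with h2 | h2
          · obtain ⟨h0, h1⟩ := (hcoremem x).mp hx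
            interval_cases i
            · simpa [hsets] using h0
            · simpa [hsets] using h1
          · exact ((hpairs 0 i (by simp [hsets]) hi (by omega) x).mpr hx).2
        intro x hxf
        rw [hcnt x]
        by_cases hxc : x ∈ core
        · right
          have heq : sets.countP (fun s => decide (x ∈ s)) = sets.length := by
            rw [List.countP_eq_length]
            intro s hs
            obtain ⟨i, hi, rfl⟩ := List.getElem_of_mem hs
            simpa using hcoreAll x hxc i hi
          simp [heq]
        · left
          have hle : sets.countP (fun s => decide (x ∈ s)) ≤ 1 := by
            by_contra hgt
            rw [Nat.not_le] at hgt
            obtain ⟨i, j, hi, hj, hij, hpi, hpj⟩ :=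
              pv_exists_two_of_countP (fun s => decide (x ∈ s)) sets (by omega)
            exact hxc ((hpairs i j hi hj hij x).mp ⟨by simpa using hpi, by simpa using hpj⟩)
          have hge : 0 < sets.countP (fun s => decide (x ∈ s)) := by
            obtain ⟨s, hs, hxs⟩ := List.mem_flatten.mp hxf
            exact List.countP_pos_iff.mpr ⟨s, hs, by simpa using hxs⟩
          have h1 : sets.countP (fun s => decide (x ∈ s)) = 1 := by omega
          simp [h1]

-- find? with A's test = findSome? with B's test
theorem pv_scan_eq (combos : List (List (List Int))) :
    (match combos.find? (fun combo => pvIsSunflower (combo.map (fun s => PySem.Set.ofList s))) with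
      | some combo => ((true : Bool), combo.map (fun s => PySem.Set.ofList s))
      | none => (false, ([] : List (List Int)))) =
    (match combos.findSome? (fun combo =>
        let sets := combo.map (fun s => PySem.Set.ofList s)
        if pvFreqOK sets then some sets else none) with
      | some sets => ((true : Bool), sets)
      | none => (false, [])) := by
  induction combos with
  | nil => rfl
  | cons c cs ih =>
    have heq : pvIsSunflower (c.map (fun s => PySem.Set.ofList s))
        = pvFreqOK (c.map (fun s => PySem.Set.ofList s)) := by
      apply pv_sunflower_eq_freq
      intro s hs
      obtain ⟨t, _, rfl⟩ := List.mem_map.mp hs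
      exact PySem.Set.nodup_ofList t
    rw [List.find?_cons, List.findSome?_cons]
    cases h : pvFreqOK (c.map (fun s => PySem.Set.ofList s)) with
    | true => simp [heq, h]
    | false => simpa [heq, h] using ih

-- ===== VERDICT (by name: the statement is the Claim_ definition above) =====
theorem contains_k_sunflower_spec : Claim_equal_contains_k_sunflower := by
  intro family k _ _
  unfold Spec_contains_k_sunflower contains_k_sunflower contains_k_sunflower_alt
  by_cases h : (family.length : Int) < k
  · simp [h]
  · simp only [h, if_false]
    exact pv_scan_eq _
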